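-- pv_equiv track=rewrite | github.com/Jianxinnn/Paired-MSA-tools | utils/vis.py | _first_entry
-- ===== SOURCE A (Python) =====
-- from typing import Dict, List, Optional, Sequence, Tuple
--
-- def _first_entry(lines: Sequence[str]) -> Tuple[str, str]:
--     """Return (header, sequence) for the first FASTA entry in lines."""
--     header = None
--     seq_parts: List[str] = []
--     for ln in lines:
--         if ln.startswith(">"):
--             if header is None:
--                 header = ln.strip()
--             elif header is not None and seq_parts:
--                 break
--         else:
--             if header is not None:
--                 seq_parts.append(ln.strip())
--     if header is None:
--         raise ValueError("No FASTA header found in A3M file")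
--     return header, "".join(seq_parts)
-- ===== SOURCE B (Python) =====
-- from typing import Dict, List, Optional, Sequence, Tuple
--
-- def _first_entry(lines: Sequence[str]) -> Tuple[str, str]:
--     """Return (header, sequence) for the first FASTA entry in lines."""
--     lines = list(lines)
--     n = len(lines)
--     # stage 1: locate the first header line
--     i = 0
--     while i < n and not lines[i].startswith(">"):
--         i += 1
--     if i == n:
--         raise ValueError("No FASTA header found in A3M file")
--     header = lines[i].strip()
--     i += 1
--     # stage 2: skip any immediately-following extra header lines
--     while i < n and lines[i].startswith(">"):
--         i += 1
--     # stage 3: gather sequence lines up to the next header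
--     j = i
--     while j < n and not lines[j].startswith(">"):
--         j += 1
--     return header, "".join(ln.strip() for ln in lines[i:j])
-- ===== Notes on version B (the rewrite author's own statement) =====
-- stated objective: simpler
-- what changed: Replaces A's single flag-driven loop (Optional header + accumulator + conditional break) with three sequential index scans: locate the first header, skip any extra header lines, then take sequence lines until the next header.
import Mathlib
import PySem

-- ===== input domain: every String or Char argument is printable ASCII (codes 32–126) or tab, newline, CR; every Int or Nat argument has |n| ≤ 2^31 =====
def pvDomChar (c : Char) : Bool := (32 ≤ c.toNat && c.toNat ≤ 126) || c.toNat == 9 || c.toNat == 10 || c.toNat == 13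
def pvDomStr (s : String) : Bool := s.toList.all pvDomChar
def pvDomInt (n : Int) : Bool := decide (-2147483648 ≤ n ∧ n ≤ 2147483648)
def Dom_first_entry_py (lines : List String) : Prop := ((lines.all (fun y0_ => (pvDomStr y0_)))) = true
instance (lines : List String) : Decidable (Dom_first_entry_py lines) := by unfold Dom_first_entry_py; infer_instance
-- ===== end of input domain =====

-- B replaces A's single flag-driven loop with three sequential scans (find header / skip extra headers / take sequence lines); objective: simpler.


-- ===== PORT A =====
-- A's loop: state = (header : Option String, seq_parts); a break returns early.
def aGo : List String → Option String → List String → Option String × List String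
  | [], h, acc => (h, acc)
  | ln :: rest, h, acc =>
    if PySem.Str.startswith ln ">" then
      match h with
      | none => aGo rest (some (PySem.Str.strip ln)) acc
      | some _ => if acc.isEmpty then aGo rest h acc else (h, acc)   -- break once seq_parts nonempty
    else
      match h with
      | none => aGo rest none acc
      | some _ => aGo rest h (acc ++ [PySem.Str.strip ln])

def first_entry_py (lines : List String) : String × String :=
  match aGo lines none [] with
  | (some h, parts) => (h, PySem.Str.join "" parts)
  | (none, _) => ("", "")   -- Python raises ValueError here; excluded by Pre_

-- ===== PORT B =====
-- stage 1 = dropWhile (not header), stage 2 = dropWhile header, stage 3 = takeWhile (not header)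
def first_entry_py_alt (lines : List String) : String × String :=
  match lines.dropWhile (fun l => !(PySem.Str.startswith l ">")) with
  | [] => ("", "")   -- Python raises ValueError here; excluded by Pre_
  | h :: rest =>
    let body := (rest.dropWhile (fun l => PySem.Str.startswith l ">")).takeWhile
        (fun l => !(PySem.Str.startswith l ">"))
    (PySem.Str.strip h, PySem.Str.join "" (body.map PySem.Str.strip))

-- ===== PRECONDITION & SPEC =====
-- Pre_ excludes exactly the inputs with no '>'-header line, on which both A and B raise ValueError.
def Pre_first_entry_py (lines : List String) : Prop :=
  (lines.any (fun l => PySem.Str.startswith l ">")) = true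
instance (lines : List String) : Decidable (Pre_first_entry_py lines) := by
  unfold Pre_first_entry_py; infer_instance
def pvWitness_first_entry_py : List String := [">h", "AC", "GT"]

def Spec_first_entry_py (lines : List String) (out : String × String) : Prop := out = first_entry_py_alt lines
instance (lines : List String) (out : String × String) : Decidable (Spec_first_entry_py lines out) := by unfold Spec_first_entry_py; infer_instance

-- ===== CLAIM (what is proved, stated in full; the proofs are below) =====
def Claim_equal_first_entry_py : Prop := ∀ (lines : List String), Dom_first_entry_py lines → Pre_first_entry_py lines → Spec_first_entry_py lines (first_entry_py lines)

-- ===== LEMMAS AND PROOFS =====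

-- phase with header found and seq_parts already nonempty: takeWhile
theorem aGo_some_cons (rest : List String) (h a : String) :
    ∀ acc, aGo rest (some h) (a :: acc) =
      (some h, (a :: acc) ++ (rest.takeWhile (fun l => !(PySem.Str.startswith l ">"))).map PySem.Str.strip) := by
  induction rest with
  | nil => intro acc; simp [aGo]
  | cons ln rest ih =>
    intro acc
    by_cases hp : PySem.Chars.startswith ln.toList ['>'] = true
    · simp [aGo, hp, List.takeWhile]
    · have := ih (acc ++ [PySem.Str.strip ln])
      simp [aGo, hp, List.takeWhile, this]

-- phase with header found, seq_parts empty: dropWhile headers, then takeWhile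
theorem aGo_some_nil (rest : List String) (h : String) :
    aGo rest (some h) [] =
      (some h, (((rest.dropWhile (fun l => PySem.Str.startswith l ">")).takeWhile
          (fun l => !(PySem.Str.startswith l ">"))).map PySem.Str.strip)) := by
  induction rest with
  | nil => simp [aGo]
  | cons ln rest ih =>
    by_cases hp : PySem.Chars.startswith ln.toList ['>'] = true
    · simp [aGo, hp, List.dropWhile, ih]
    · simp [aGo, hp, List.dropWhile, aGo_some_cons]

-- phase before a header: dropWhile non-headers
theorem aGo_none (lines : List String) :
    aGo lines none [] =
      match lines.dropWhile (fun l => !(PySem.Str.startswith l ">")) with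
      | [] => (none, [])
      | h :: rest => aGo rest (some (PySem.Str.strip h)) [] := by
  induction lines with
  | nil => simp [aGo]
  | cons ln rest ih =>
    by_cases hp : PySem.Chars.startswith ln.toList ['>'] = true
    · simp [aGo, hp, List.dropWhile]
    · simp [aGo, hp, List.dropWhile, ih]

-- ===== VERDICT (by name: the statement is the Claim_ definition above) =====
theorem first_entry_py_spec : Claim_equal_first_entry_py := by
  intro lines _ hpre
  unfold Spec_first_entry_py first_entry_py first_entry_py_alt
  rw [aGo_none]
  cases hdw : lines.dropWhile (fun l => !(PySem.Str.startswith l ">")) with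
  | nil =>
    exfalso
    rw [List.dropWhile_eq_nil_iff] at hdw
    unfold Pre_first_entry_py at hpre
    rw [List.any_eq_true] at hpre
    obtain ⟨x, hx, hpx⟩ := hpre
    have := hdw x hx
    simp only [PySem.Str.startswith_eq] at hpx this
    rw [hpx] at this
    exact absurd this (by simp)
  | cons h rest =>
    simp [aGo_some_nil]
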